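-- pv_equiv track=rewrite | github.com/Muharremq/ReelSpirit | reels-analizer-backend/app/services/ai_analyzer.py | merge_analysis_with_posts
-- ===== SOURCE A (Python) =====
-- def merge_analysis_with_posts(original_posts, ai_results):
--     """Merges AI results with original post objects."""
--     ai_map = {str(res['id']): res for res in ai_results}
--
--     for post in original_posts:
--         p_id = str(post.get('id') or post.get('instagram_id', ''))
--         if p_id in ai_map:
--             res = ai_map[p_id]
--             post['ai_category'] = res.get('category', 'General')
--             post['ai_summary'] = res.get('summary', '')
--             post['drink_category'] = res.get('drink_category', 'Other')
--         else:
--             post['drink_category'] = 'Unprocessed'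
--             post['ai_category'] = 'General'
--             post['ai_summary'] = ''
--
--     return original_posts
-- ===== SOURCE B (Python) =====
-- def merge_analysis_with_posts(original_posts, ai_results):
--     """Merges AI results with original post objects.
--
--     B: index post positions by id, walk ai_results updating matched posts,
--     then default-fill the unmatched posts (mutates original_posts like A)."""
--     index = {}
--     for i, post in enumerate(original_posts):
--         p_id = str(post.get('id') or post.get('instagram_id', ''))
--         index.setdefault(p_id, []).append(i)
--     for res in ai_results:
--         key = str(res['id'])
--         for i in index.get(key, []):
--             post = original_posts[i]
--             post['ai_category'] = res.get('category', 'General')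
--             post['ai_summary'] = res.get('summary', '')
--             post['drink_category'] = res.get('drink_category', 'Other')
--     matched = {str(res['id']) for res in ai_results}
--     for post in original_posts:
--         if str(post.get('id') or post.get('instagram_id', '')) not in matched:
--             post['drink_category'] = 'Unprocessed'
--             post['ai_category'] = 'General'
--             post['ai_summary'] = ''
--     return original_posts
-- ===== Notes on version B (the rewrite author's own statement) =====
-- stated objective: alternative
-- what changed: B inverts the traversal: instead of building a dict of ai_results and scanning posts once, it indexes post positions by id in a first pass, walks ai_results updating the matched posts, and default-fills unmatched posts in a final pass.
import Mathlib
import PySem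

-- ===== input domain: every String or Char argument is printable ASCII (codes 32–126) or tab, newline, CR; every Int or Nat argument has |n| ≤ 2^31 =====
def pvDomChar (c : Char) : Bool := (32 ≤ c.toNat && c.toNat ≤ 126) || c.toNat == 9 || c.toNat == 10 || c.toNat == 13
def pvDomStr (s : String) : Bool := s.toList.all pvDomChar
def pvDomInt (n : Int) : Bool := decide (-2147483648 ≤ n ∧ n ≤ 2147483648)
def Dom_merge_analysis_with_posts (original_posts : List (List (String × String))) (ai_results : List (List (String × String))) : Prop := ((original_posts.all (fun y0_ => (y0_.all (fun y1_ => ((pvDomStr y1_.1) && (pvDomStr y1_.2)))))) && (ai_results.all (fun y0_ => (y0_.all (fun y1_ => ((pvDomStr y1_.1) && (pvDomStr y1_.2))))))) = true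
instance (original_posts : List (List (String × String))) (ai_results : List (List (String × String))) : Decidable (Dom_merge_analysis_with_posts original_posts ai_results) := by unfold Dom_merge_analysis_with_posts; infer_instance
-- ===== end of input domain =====

-- B inverts A's traversal: it indexes post positions by id, walks ai_results updating matched
-- posts, then default-fills unmatched posts.  Both Pythons mutate the post dicts in place and
-- return the same list; the ports (pure) compute that returned value.

-- ===== PORT A =====
-- p_id = str(post.get('id') or post.get('instagram_id', '')) : get('id') is falsy when missing
-- or '' (values are strings on this domain, str() is the identity).
def pvPid (post : List (String × String)) : String :=
  let s := (PySem.Dict.mk post).getD "id" ""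
  if s = "" then (PySem.Dict.mk post).getD "instagram_id" "" else s

-- the three assignments of A's matched branch (and of B's update pass), in order
def pvApplyRes (res p : PySem.Dict String String) : PySem.Dict String String :=
  ((p.insert "ai_category" (res.getD "category" "General")).insert
      "ai_summary" (res.getD "summary" "")).insert
      "drink_category" (res.getD "drink_category" "Other")

-- the three assignments of the else branch, in order
def pvApplyDefault (p : PySem.Dict String String) : PySem.Dict String String :=
  ((p.insert "drink_category" "Unprocessed").insert "ai_category" "General").insert "ai_summary" ""

-- res['id'] raises KeyError when 'id' is missing (excluded by Pre_); inside Pre_ it is getD res "id" _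
def merge_analysis_with_posts (original_posts : List (List (String × String))) (ai_results : List (List (String × String))) : List (List (String × String)) :=
  let ai_map : PySem.Dict String (PySem.Dict String String) :=
    ai_results.foldl (fun m res => m.insert ((PySem.Dict.mk res).getD "id" "") (PySem.Dict.mk res)) PySem.Dict.empty
  original_posts.map (fun post =>
    match ai_map.get? (pvPid post) with
    | some res => (pvApplyRes res (PySem.Dict.mk post)).items
    | none => (pvApplyDefault (PySem.Dict.mk post)).items)

-- ===== PORT B =====
def merge_analysis_with_posts_alt (original_posts : List (List (String × String))) (ai_results : List (List (String × String))) : List (List (String × String)) :=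
  -- pass 1: index.setdefault(p_id, []).append(i)
  let index : PySem.Dict String (List Int) :=
    (PySem.List.enumerate original_posts).foldl
      (fun d ip => d.modify (pvPid ip.2) [] (· ++ [ip.1])) PySem.Dict.empty
  -- pass 2: for res in ai_results: for i in index.get(key, []): update original_posts[i]
  -- (i comes from enumerate so 0 ≤ i: .toNat is exact for the write)
  let arr : List (List (String × String)) :=
    ai_results.foldl (fun arr res =>
      (index.getD ((PySem.Dict.mk res).getD "id" "") []).foldl
        (fun (arr : List (List (String × String))) i =>
          arr.set i.toNat (pvApplyRes (PySem.Dict.mk res) (PySem.Dict.mk (PySem.List.pyGetD arr i []))).items)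
        arr)
      original_posts
  -- matched = {str(res['id']) for res in ai_results}
  let matched : PySem.Set String := PySem.Set.ofList (ai_results.map (fun res => (PySem.Dict.mk res).getD "id" ""))
  -- pass 3: default-fill posts whose id is not matched
  arr.map (fun post => if pvPid post ∈ matched then post else (pvApplyDefault (PySem.Dict.mk post)).items)

-- ===== PRECONDITION & SPEC =====
-- Pre_ excludes exactly the inputs where some ai_result lacks the key 'id': there both A and B
-- raise KeyError at res['id'].
def Pre_merge_analysis_with_posts (original_posts : List (List (String × String))) (ai_results : List (List (String × String))) : Prop :=
  ai_results.all (fun res => (PySem.Dict.mk res).contains "id") = true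
instance (original_posts : List (List (String × String))) (ai_results : List (List (String × String))) : Decidable (Pre_merge_analysis_with_posts original_posts ai_results) := by unfold Pre_merge_analysis_with_posts; infer_instance

def pvWitness_merge_analysis_with_posts : (List (List (String × String))) × (List (List (String × String))) :=
  ([[("id", "1"), ("caption", "x")], [("instagram_id", "2")]],
   [[("id", "1"), ("category", "Bar"), ("summary", "s"), ("drink_category", "Beer")]])

def Spec_merge_analysis_with_posts (original_posts : List (List (String × String))) (ai_results : List (List (String × String))) (out : List (List (String × String))) : Prop := out = merge_analysis_with_posts_alt original_posts ai_results
instance (original_posts : List (List (String × String))) (ai_results : List (List (String × String))) (out : List (List (String × String))) : Decidable (Spec_merge_analysis_with_posts original_posts ai_results out) := by unfold Spec_merge_analysis_with_posts; infer_instance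

-- ===== CLAIM (what is proved, stated in full; the proofs are below) =====
def Claim_equal_merge_analysis_with_posts : Prop := ∀ (original_posts : List (List (String × String))) (ai_results : List (List (String × String))), Dom_merge_analysis_with_posts original_posts ai_results → Pre_merge_analysis_with_posts original_posts ai_results → Spec_merge_analysis_with_posts original_posts ai_results (merge_analysis_with_posts original_posts ai_results)

-- ===== LEMMAS AND PROOFS =====

-- key of an ai_result (= str(res['id']) inside Pre_)
def pvKey (res : List (String × String)) : String := (PySem.Dict.mk res).getD "id" ""

-- the last ai_result of ar whose key is k, starting from acc (what A's last-wins dict keeps)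
def pvLastFrom (acc : Option (PySem.Dict String String)) (ar : List (List (String × String))) (k : String) : Option (PySem.Dict String String) :=
  ar.foldl (fun acc res => if pvKey res = k then some (PySem.Dict.mk res) else acc) acc

lemma pvLastFrom_append (acc) (l r : List (List (String × String))) (k : String) :
    pvLastFrom acc (l ++ r) k = pvLastFrom (pvLastFrom acc l k) r k := by
  simp [pvLastFrom, List.foldl_append]

lemma aiMap_get? (ar : List (List (String × String))) (m0 : PySem.Dict String (PySem.Dict String String)) (k : String) :
    (ar.foldl (fun m res => m.insert (pvKey res) (PySem.Dict.mk res)) m0).get? k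
      = pvLastFrom (m0.get? k) ar k := by
  induction ar generalizing m0 with
  | nil => simp [pvLastFrom]
  | cons res rest ih =>
    simp only [List.foldl_cons, ih]
    by_cases h : pvKey res = k
    · subst h; simp [pvLastFrom, PySem.Dict.get?_insert_self]
    · simp only [PySem.Dict.get?_insert]
      rw [if_neg (Ne.symm h)]
      simp [pvLastFrom, h]

lemma pvLastFrom_eq_none_iff (ar : List (List (String × String))) (acc) (k : String) :
    pvLastFrom acc ar k = none ↔ acc = none ∧ ∀ r ∈ ar, pvKey r ≠ k := by
  induction ar generalizing acc with
  | nil => simp [pvLastFrom]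
  | cons res rest ih =>
    simp only [pvLastFrom, List.foldl_cons] at *
    by_cases h : pvKey res = k
    · rw [if_pos h]; simp [ih, h]
    · rw [if_neg h]; simp [ih, h]

-- two inserts at distinct keys commute when the second key is already present
lemma ins_comm {ν : Type} (d : PySem.Dict String ν) (k1 k2 : String) (v1 v2 : ν)
    (h12 : k1 ≠ k2) (h : d.contains k1 = true) :
    (d.insert k2 v2).insert k1 v1 = (d.insert k1 v1).insert k2 v2 := by
  apply PySem.Dict.ext
  by_cases h2 : d.contains k2 = true
  · rw [PySem.Dict.items_insert_of_contains _ v1 (by simp [PySem.Dict.contains_insert, h]),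
        PySem.Dict.items_insert_of_contains _ v2 h2,
        PySem.Dict.items_insert_of_contains _ v2 (by simp [PySem.Dict.contains_insert, h2]),
        PySem.Dict.items_insert_of_contains _ v1 h]
    simp only [List.map_map]
    apply List.map_congr_left
    intro p _
    by_cases e1 : p.1 = k1 <;> by_cases e2 : p.1 = k2 <;>
      simp_all [Function.comp, Ne.symm h12]
  · rw [PySem.Dict.items_insert_of_contains _ v1 (by simp [PySem.Dict.contains_insert, h]),
        PySem.Dict.items_insert_of_not_contains _ v2 (by simp_all),
        PySem.Dict.items_insert_of_not_contains _ v2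
          (by simp_all [PySem.Dict.contains_insert, Ne.symm h12]),
        PySem.Dict.items_insert_of_contains _ v1 h]
    simp only [List.map_append]
    congr 1
    simp [Ne.symm h12]

-- updating a post with one result and then another is the same as updating with the second alone
lemma apply_absorb (r1 r2 p : PySem.Dict String String) :
    pvApplyRes r2 (pvApplyRes r1 p) = pvApplyRes r2 p := by
  unfold pvApplyRes
  rw [ins_comm _ "ai_category" "drink_category" _ _ (by decide)
        (by simp [PySem.Dict.contains_insert, PySem.Dict.contains_insert_self]),
      ins_comm _ "ai_category" "ai_summary" _ _ (by decide)
        (by simp [PySem.Dict.contains_insert_self]),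
      PySem.Dict.insert_insert_self,
      ins_comm _ "ai_summary" "drink_category" _ _ (by decide)
        (by simp [PySem.Dict.contains_insert_self]),
      PySem.Dict.insert_insert_self, PySem.Dict.insert_insert_self]

-- the update pass never touches the 'id' / 'instagram_id' keys
lemma pid_applyRes (res : PySem.Dict String String) (p : List (String × String)) :
    pvPid (pvApplyRes res (PySem.Dict.mk p)).items = pvPid p := by
  unfold pvPid pvApplyRes
  rw [show ∀ d : PySem.Dict String String, PySem.Dict.mk d.items = d from fun _ => rfl]
  rw [PySem.Dict.getD_insert_of_ne _ _ _ (by decide), PySem.Dict.getD_insert_of_ne _ _ _ (by decide),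
      PySem.Dict.getD_insert_of_ne _ _ _ (by decide), PySem.Dict.getD_insert_of_ne _ _ _ (by decide),
      PySem.Dict.getD_insert_of_ne _ _ _ (by decide), PySem.Dict.getD_insert_of_ne _ _ _ (by decide)]

-- the position index built in B's first pass, looked up at k, is the filtered range of positions
lemma index_getD (op : List (List (String × String))) (k : String) :
    ((PySem.List.enumerate op).foldl (fun d ip => d.modify (pvPid ip.2) [] (· ++ [ip.1])) PySem.Dict.empty).getD k []
      = (PySem.List.pyRange 0 (PySem.List.len op) 1).filter
          (fun j => pvPid (PySem.List.pyGetD op j []) == k) := by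
  have h1 : (PySem.List.enumerate op).foldl (fun d ip => d.modify (pvPid ip.2) [] (· ++ [ip.1])) PySem.Dict.empty
      = ((PySem.List.enumerate op).map (fun ip => (pvPid ip.2, ip.1))).foldl
          (fun d p => d.modify p.1 [] (· ++ [p.2])) PySem.Dict.empty := by
    rw [List.foldl_map]
  rw [h1, PySem.Dict.getD_foldl_modify_append]
  rw [PySem.List.enumerate_eq_map_pyRange op []]
  simp [List.map_map, List.filter_map, Function.comp_def]

-- the inner write loop of B's second pass, pointwise
lemma foldl_set_spec (g : List (String × String) → List (String × String))
    (pos : List Int) (arr : List (List (String × String)))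
    (hnd : pos.Nodup) (hpos : ∀ i ∈ pos, 0 ≤ i) :
    (pos.foldl (fun a i => a.set i.toNat (g (PySem.List.pyGetD a i []))) arr).length = arr.length ∧
    ∀ j : Nat, (pos.foldl (fun a i => a.set i.toNat (g (PySem.List.pyGetD a i []))) arr)[j]? =
      if (j : Int) ∈ pos ∧ j < arr.length then some (g (arr.getD j [])) else arr[j]? := by
  induction pos generalizing arr with
  | nil => simp
  | cons i rest ih =>
    have hi : 0 ≤ i := hpos i (by simp)
    have hrest : ∀ x ∈ rest, 0 ≤ x := fun x hx => hpos x (by simp [hx])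
    have hni : i ∉ rest := by simpa using hnd.notMem
    set a1 := arr.set i.toNat (g (PySem.List.pyGetD arr i [])) with ha1
    have hlen1 : a1.length = arr.length := by simp [ha1]
    obtain ⟨ihl, ihg⟩ := ih a1 hnd.of_cons hrest
    constructor
    · simpa [hlen1] using ihl
    · intro j
      rw [List.foldl_cons, ← ha1, ihg j, hlen1]
      by_cases hji : (j : Int) = i
      · have hjt : i.toNat = j := by omega
        have hjr : (j : Int) ∉ rest := by rw [hji]; exact hni
        simp only [hjr, false_and, if_false]
        rw [ha1, List.getElem?_set, if_pos hjt]
        by_cases hjl : j < arr.length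
        · rw [if_pos (by omega)]
          rw [if_pos ⟨by simp [hji], hjl⟩]
          rw [PySem.List.pyGetD_of_nonneg _ _ hi, hjt]
        · rw [if_neg (by omega)]
          rw [if_neg (by simp [hjl])]
          symm
          exact (List.getElem?_eq_none (by omega))
      · have hne : i.toNat ≠ j := by omega
        have ha1j : a1[j]? = arr[j]? := by rw [ha1, List.getElem?_set, if_neg hne]
        have ha1d : a1.getD j [] = arr.getD j [] := by simp [List.getD, ha1j]
        by_cases hjr : (j : Int) ∈ rest
        · simp [hjr, ha1j, List.mem_cons]
        · have : (j : Int) ∉ (i :: rest) := by simp [hjr, hji]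
          simp [hjr, this, ha1j]

-- B's second pass, pointwise: position j holds the original post updated by the last matching result
lemma pass2_spec (op : List (List (String × String))) (ar : List (List (String × String))) :
    (ar.foldl (fun arr res =>
        (((PySem.List.enumerate op).foldl (fun d ip => d.modify (pvPid ip.2) [] (· ++ [ip.1])) PySem.Dict.empty).getD ((PySem.Dict.mk res).getD "id" "") []).foldl
          (fun (arr : List (List (String × String))) i =>
            arr.set i.toNat (pvApplyRes (PySem.Dict.mk res) (PySem.Dict.mk (PySem.List.pyGetD arr i []))).items)
          arr)
      op).length = op.length ∧
    ∀ j : Nat, j < op.length →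
      (ar.foldl (fun arr res =>
        (((PySem.List.enumerate op).foldl (fun d ip => d.modify (pvPid ip.2) [] (· ++ [ip.1])) PySem.Dict.empty).getD ((PySem.Dict.mk res).getD "id" "") []).foldl
          (fun (arr : List (List (String × String))) i =>
            arr.set i.toNat (pvApplyRes (PySem.Dict.mk res) (PySem.Dict.mk (PySem.List.pyGetD arr i []))).items)
          arr)
      op)[j]? = some (match pvLastFrom none ar (pvPid (op.getD j [])) with
        | some r => (pvApplyRes r (PySem.Dict.mk (op.getD j []))).items
        | none => op.getD j []) := by
  induction ar using List.reverseRecOn with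
  | nil =>
    constructor
    · rfl
    · intro j hj
      simp [pvLastFrom, List.getElem?_eq_getElem hj, List.getD]
  | append_singleton rest res ih =>
    obtain ⟨ihl, ihg⟩ := ih
    rw [List.foldl_append, List.foldl_cons, List.foldl_nil]
    rw [index_getD op ((PySem.Dict.mk res).getD "id" "")]
    have hnd : ((PySem.List.pyRange 0 (PySem.List.len op) 1).filter
        (fun j => pvPid (PySem.List.pyGetD op j []) == (PySem.Dict.mk res).getD "id" "")).Nodup :=
      (PySem.List.nodup_pyRange_one 0 (PySem.List.len op)).filter _
    have hpos : ∀ i ∈ (PySem.List.pyRange 0 (PySem.List.len op) 1).filter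
        (fun j => pvPid (PySem.List.pyGetD op j []) == (PySem.Dict.mk res).getD "id" ""), 0 ≤ i := by
      intro i hi
      have := List.of_mem_filter hi
      have hm := List.mem_of_mem_filter hi
      exact (PySem.List.mem_pyRange_one.mp hm).1
    obtain ⟨hl, hg⟩ := foldl_set_spec
      (fun p => (pvApplyRes (PySem.Dict.mk res) (PySem.Dict.mk p)).items) _ _ hnd hpos
    constructor
    · rw [hl, ihl]
    · intro j hj
      rw [hg j, ihl]
      have hmem : ((j : Int) ∈ (PySem.List.pyRange 0 (PySem.List.len op) 1).filter
          (fun x => pvPid (PySem.List.pyGetD op x []) == (PySem.Dict.mk res).getD "id" ""))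
          ↔ pvPid (op.getD j []) = (PySem.Dict.mk res).getD "id" "" := by
        rw [List.mem_filter, PySem.List.mem_pyRange_one]
        rw [PySem.List.pyGetD_of_nonneg _ _ (by omega : (0:Int) ≤ (j:Int))]
        simp only [Int.toNat_natCast, beq_iff_eq]
        constructor
        · exact fun h => h.2
        · intro h
          exact ⟨⟨by omega, by simpa [PySem.List.len] using (by exact_mod_cast hj : (j:Int) < (op.length:Int))⟩, h⟩
      have hgetD : (rest.foldl (fun arr res =>
          (((PySem.List.enumerate op).foldl (fun d ip => d.modify (pvPid ip.2) [] (· ++ [ip.1])) PySem.Dict.empty).getD ((PySem.Dict.mk res).getD "id" "") []).foldl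
            (fun (arr : List (List (String × String))) i =>
              arr.set i.toNat (pvApplyRes (PySem.Dict.mk res) (PySem.Dict.mk (PySem.List.pyGetD arr i []))).items)
            arr)
        op).getD j [] = (match pvLastFrom none rest (pvPid (op.getD j [])) with
          | some r => (pvApplyRes r (PySem.Dict.mk (op.getD j []))).items
          | none => op.getD j []) := by
        rw [List.getD_eq_getElem?_getD, ihg j hj]
        rfl
      rw [pvLastFrom_append]
      by_cases hpid : pvPid (op.getD j []) = (PySem.Dict.mk res).getD "id" ""
      · rw [if_pos ⟨hmem.2 hpid, hj⟩, hgetD]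
        have hkey : pvKey res = pvPid (op.getD j []) := hpid.symm
        rw [show pvLastFrom (pvLastFrom none rest (pvPid (op.getD j []))) [res] (pvPid (op.getD j []))
              = some (PySem.Dict.mk res) by
                simp only [pvLastFrom, List.foldl_cons, List.foldl_nil]; rw [if_pos hkey]]
        cases hprev : pvLastFrom none rest (pvPid (op.getD j [])) with
        | none => rfl
        | some r =>
          simp only
          congr 1
          exact congrArg PySem.Dict.items
            (apply_absorb r (PySem.Dict.mk res) (PySem.Dict.mk (op.getD j [])))
      · rw [if_neg (fun hc => hpid (hmem.1 hc.1)), ihg j hj]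
        have hkey : ¬ (pvKey res = pvPid (op.getD j [])) := fun hc => hpid hc.symm
        rw [show pvLastFrom (pvLastFrom none rest (pvPid (op.getD j []))) [res] (pvPid (op.getD j []))
              = pvLastFrom none rest (pvPid (op.getD j [])) by
                simp only [pvLastFrom, List.foldl_cons, List.foldl_nil]; rw [if_neg hkey]]

-- ===== VERDICT (by name: the statement is the Claim_ definition above) =====
theorem merge_analysis_with_posts_spec : Claim_equal_merge_analysis_with_posts := by
  intro op ar _ _
  unfold Spec_merge_analysis_with_posts
  simp only [merge_analysis_with_posts, merge_analysis_with_posts_alt]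
  obtain ⟨hl, hg⟩ := pass2_spec op ar
  apply List.ext_getElem
  · simp only [List.length_map]; rw [hl]
  · intro j hj hj2
    have hj' : j < op.length := by simpa using hj
    rw [List.getElem_map, List.getElem_map]
    have hb := hg j hj'
    rw [List.getElem?_eq_getElem (by rw [hl]; exact hj')] at hb
    have hbv := Option.some.inj hb
    rw [hbv]
    have hget : op.getD j [] = op[j] := by
      rw [List.getD_eq_getElem?_getD, List.getElem?_eq_getElem hj']; rfl
    rw [hget]
    have hA : (List.foldl (fun m res => m.insert ((PySem.Dict.mk res).getD "id" "") (PySem.Dict.mk res)) PySem.Dict.empty ar).get? (pvPid op[j])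
        = pvLastFrom none ar (pvPid op[j]) := by
      have h0 := aiMap_get? ar PySem.Dict.empty (pvPid op[j])
      rw [PySem.Dict.get?_empty] at h0
      exact h0
    rw [hA]
    have hmm : ∀ V : List (String × String),
        (pvPid V ∈ PySem.Set.ofList (ar.map (fun res => (PySem.Dict.mk res).getD "id" ""))
          ↔ ∃ r ∈ ar, pvKey r = pvPid V) := by
      intro V
      rw [PySem.Set.mem_ofList]
      simp only [List.mem_map, pvKey]
    cases hprev : pvLastFrom none ar (pvPid op[j]) with
    | some r =>
      have hin : pvPid ((pvApplyRes r (PySem.Dict.mk op[j])).items)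
          ∈ PySem.Set.ofList (ar.map (fun res => (PySem.Dict.mk res).getD "id" "")) := by
        rw [hmm, pid_applyRes r op[j]]
        by_contra hno
        push Not at hno
        have : pvLastFrom none ar (pvPid op[j]) = none :=
          (pvLastFrom_eq_none_iff ar none _).2 ⟨rfl, fun rr hrr => hno rr hrr⟩
        rw [hprev] at this; exact Option.some_ne_none r this
      simp only
      rw [if_pos hin]
    | none =>
      have hnone := (pvLastFrom_eq_none_iff ar none (pvPid op[j])).1 hprev
      have hout : pvPid op[j]
          ∉ PySem.Set.ofList (ar.map (fun res => (PySem.Dict.mk res).getD "id" "")) := by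
        rw [hmm]
        rintro ⟨r, hr, he⟩
        exact hnone.2 r hr he
      simp only
      rw [if_neg hout]
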